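-- pv_equiv track=rewrite | github.com/Sumit-kj/PracticeProblems | src/Array/reorganize_the_array.py | reorganize_the_array
-- ===== SOURCE A (Python) =====
-- def reorganize_the_array(arr):
--     """
--     This function reorganizes the array such that arr[i] = i, -1 otherwise
--     Args:
--         arr: The list of elements
--     Returns:
--         The resultant array
--     """
--     n = len(arr)
--     i = 0
--     while i < n:
--         if arr[i] == i:
--             i += 1
--             continue
--         else:
--             j = 0
--             while j < n:
--                 if arr[j] == i:
--                     arr[j], arr[i] = arr[i], arr[j]
--                     break
--                 j += 1
--         i += 1
--     return arr
-- ===== SOURCE B (Python) =====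
-- def reorganize_the_array(arr):
--     """
--     Same result as A, but instead of swapping values in the array and
--     rescanning it, track token movement with a position permutation:
--     sigma[p] = original index of the token currently at position p, inv its
--     inverse.  The 'first position holding value i' query is answered by
--     minimizing inv over value i's original occurrence list (built once), so
--     the value array is never scanned or mutated during the process; the
--     result is assembled at the end as arr composed with sigma.
--     """
--     n = len(arr)
--     occ = {}
--     for p, v in enumerate(arr):
--         occ.setdefault(v, []).append(p)
--     sigma = list(range(n))
--     inv = list(range(n))
--     for i in range(n):
--         if arr[sigma[i]] == i:
--             continue
--         ps = occ.get(i)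
--         if not ps:
--             continue
--         j = min(inv[q] for q in ps)
--         si, sj = sigma[i], sigma[j]
--         sigma[i], sigma[j] = sj, si
--         inv[si], inv[sj] = j, i
--     arr[:] = [arr[s] for s in sigma]
--     return arr
-- ===== Notes on version B (the rewrite author's own statement) =====
-- stated objective: faster
-- what changed: B never scans or mutates the value array: it tracks token movement with a position permutation sigma and its inverse, answers each 'first position of value i' query by minimizing the inverse permutation over i's original occurrence list (built once), and assembles the result at the end as arr composed with sigma.
import Mathlib
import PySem

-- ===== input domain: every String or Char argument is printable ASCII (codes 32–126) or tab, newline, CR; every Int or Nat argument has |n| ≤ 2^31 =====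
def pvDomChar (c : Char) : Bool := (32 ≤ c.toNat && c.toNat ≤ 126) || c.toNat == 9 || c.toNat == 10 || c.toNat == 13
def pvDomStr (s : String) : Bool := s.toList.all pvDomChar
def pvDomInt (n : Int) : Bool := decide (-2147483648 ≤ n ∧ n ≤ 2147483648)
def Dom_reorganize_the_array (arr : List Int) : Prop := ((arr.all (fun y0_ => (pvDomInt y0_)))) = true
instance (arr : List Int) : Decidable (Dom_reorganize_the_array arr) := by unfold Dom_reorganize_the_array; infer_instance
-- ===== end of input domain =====

-- B replaces A's quadratic value-array swap-and-rescan with a position-permutation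
-- (sigma/inv) over a static occurrence index, assembling the result at the end
-- (objective: faster); both A and B mutate the caller's list in place in Python,
-- the equivalence proved here is about the returned value.


-- ===== PORT A =====
-- inner 'while j < n' scan: finds the first j with arr[j] == i and swaps arr[j], arr[i]
-- (indices are always in range, so arr[k] is ported as List.getD k 0)
def pvAinner (arr : List Int) (i : Nat) (j : Nat) : List Int :=
  if _h : j < arr.length then
    if arr.getD j 0 = (i : Int) then
      -- arr[j], arr[i] = arr[i], arr[j]
      (arr.set j (arr.getD i 0)).set i (arr.getD j 0)
    else
      pvAinner arr i (j + 1)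
  else arr
termination_by arr.length - j

-- outer 'while i < n' loop; fuel = n, the exact number of iterations (i goes 0,1,…,n-1)
def pvAloop : Nat → List Int → Nat → List Int
  | 0, arr, _ => arr
  | fuel + 1, arr, i =>
    if i < arr.length then
      if arr.getD i 0 = (i : Int) then pvAloop fuel arr (i + 1)
      else pvAloop fuel (pvAinner arr i 0) (i + 1)
    else arr

def reorganize_the_array (arr : List Int) : List Int :=
  pvAloop arr.length arr 0

-- ===== PORT B =====
-- occ = {}; for p, v in enumerate(arr): occ.setdefault(v, []).append(p)
def pvBocc (arr : List Int) : PySem.Dict Int (List Nat) :=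
  (List.range arr.length).foldl
    (fun occ p => occ.insert (arr.getD p 0) (occ.getD (arr.getD p 0) [] ++ [p]))
    PySem.Dict.empty

-- one iteration of B's 'for i in range(n)' loop; state = (sigma, inv)
def pvBstep (arr : List Int) (occ : PySem.Dict Int (List Nat))
    (st : List Nat × List Nat) (i : Nat) : List Nat × List Nat :=
  let sigma := st.1
  let inv := st.2
  if arr.getD (sigma.getD i 0) 0 = (i : Int) then st
  else
    if occ.getD (i : Int) [] = [] then st
    else
      -- j = min(inv[q] for q in ps)  (ps is nonempty here, so the none branch is unreachable)
      match PySem.List.min? ((occ.getD (i : Int) []).map (fun q => inv.getD q 0)) (fun x => x) with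
      | none => st
      | some j =>
        let si := sigma.getD i 0
        let sj := sigma.getD j 0
        ((sigma.set i sj).set j si, (inv.set si j).set sj i)


-- arr[:] = [arr[s] for s in sigma]; n, occ, sigma/inv inlined
def reorganize_the_array_alt (arr : List Int) : List Int :=
  (List.range arr.length).map (fun p =>
    arr.getD ((((List.range arr.length).foldl (pvBstep arr (pvBocc arr))
      (List.range arr.length, List.range arr.length)).1).getD p 0) 0)

-- ===== PRECONDITION & SPEC =====
def Spec_reorganize_the_array (arr : List Int) (out : List Int) : Prop := out = reorganize_the_array_alt arr
instance (arr : List Int) (out : List Int) : Decidable (Spec_reorganize_the_array arr out) := by unfold Spec_reorganize_the_array; infer_instance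

-- ===== CLAIM (what is proved, stated in full; the proofs are below) =====
def Claim_equal_reorganize_the_array : Prop := ∀ (arr : List Int), Dom_reorganize_the_array arr → Spec_reorganize_the_array arr (reorganize_the_array arr)

-- ===== LEMMAS AND PROOFS =====

-- first index k ≥ j with arr[k] = i, mirroring pvAinner's scan
def pvFindFrom (arr : List Int) (i : Nat) (j : Nat) : Option Nat :=
  if _h : j < arr.length then
    if arr.getD j 0 = (i : Int) then some j
    else pvFindFrom arr i (j + 1)
  else none
termination_by arr.length - j

lemma pvAinner_eq_find (arr : List Int) (i j : Nat) :
    pvAinner arr i j = match pvFindFrom arr i j with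
      | some k => (arr.set k (arr.getD i 0)).set i (arr.getD k 0)
      | none => arr := by
  fun_induction pvAinner arr i j with
  | case1 j h hv =>
      rw [pvFindFrom.eq_def, dif_pos h, if_pos hv]
  | case2 j h hv ih =>
      rw [pvFindFrom.eq_def, dif_pos h, if_neg hv]
      exact ih
  | case3 j h =>
      rw [pvFindFrom.eq_def, dif_neg h]

lemma pvFindFrom_some (arr : List Int) (i j k : Nat)
    (h : pvFindFrom arr i j = some k) :
    j ≤ k ∧ k < arr.length ∧ arr.getD k 0 = (i : Int) ∧
      ∀ m, j ≤ m → m < k → arr.getD m 0 ≠ (i : Int) := by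
  fun_induction pvFindFrom arr i j with
  | case1 j hj hv =>
      simp only [Option.some.injEq] at h
      subst h
      exact ⟨le_refl _, hj, hv, fun m hm1 hm2 => by omega⟩
  | case2 j hj hv ih =>
      obtain ⟨h1, h2, h3, h4⟩ := ih h
      refine ⟨by omega, h2, h3, fun m hm1 hm2 => ?_⟩
      rcases Nat.eq_or_lt_of_le hm1 with rfl | hlt
      · exact hv
      · exact h4 m hlt hm2
  | case3 j hj =>
      simp at h

lemma pvFindFrom_none (arr : List Int) (i j : Nat)
    (h : pvFindFrom arr i j = none) :
    ∀ m, j ≤ m → m < arr.length → arr.getD m 0 ≠ (i : Int) := by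
  fun_induction pvFindFrom arr i j with
  | case1 j hj hv =>
      simp at h
  | case2 j hj hv ih =>
      intro m hm1 hm2
      rcases Nat.eq_or_lt_of_le hm1 with rfl | hlt
      · exact hv
      · exact ih h m hlt hm2
  | case3 j hj =>
      intro m hm1 hm2
      omega

lemma pvOcc_fold (arr : List Int) (l : List Nat) (pos0 : PySem.Dict Int (List Nat)) (v : Int) :
    (l.foldl (fun occ p =>
        occ.insert (arr.getD p 0) (occ.getD (arr.getD p 0) [] ++ [p])) pos0).getD v []
      = pos0.getD v [] ++ l.filter (fun q => decide (arr.getD q 0 = v)) := by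
  induction l generalizing pos0 with
  | nil => simp
  | cons a t ih =>
      rw [List.foldl_cons, List.filter_cons, ih, PySem.Dict.getD_insert]
      by_cases hv : arr.getD a 0 = v
      · rw [if_pos hv.symm, hv, if_pos (by simp)]
        simp
      · rw [if_neg (fun h => hv h.symm), if_neg (by simpa using hv)]

lemma pvBocc_getD (arr : List Int) (v : Int) :
    (pvBocc arr).getD v []
      = (List.range arr.length).filter (fun q => decide (arr.getD q 0 = v)) := by
  unfold pvBocc
  rw [pvOcc_fold]
  simp

-- getD after set
lemma pvGetD_set {α : Type} (l : List α) (a b : Nat) (v d : α) :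
    (l.set a v).getD b d = if a = b ∧ a < l.length then v else l.getD b d := by
  simp only [List.getD, List.getElem?_set]
  by_cases h1 : a = b
  · subst h1
    by_cases h2 : a < l.length
    · simp [h2]
    · simp [h2]
  · simp [h1]

lemma pvRange_getD (n p : Nat) (h : p < n) : (List.range n).getD p 0 = p := by
  simp [List.getD, h]

-- B's invariant: sigma is a permutation of [0, n) with inverse inv, and A's
-- current array a is arr composed with sigma.
def pvInvB (arr a : List Int) (sigma inv : List Nat) : Prop :=
  a.length = arr.length ∧ sigma.length = arr.length ∧ inv.length = arr.length ∧
  (∀ p, p < arr.length → sigma.getD p 0 < arr.length ∧ inv.getD (sigma.getD p 0) 0 = p) ∧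
  (∀ q, q < arr.length → inv.getD q 0 < arr.length ∧ sigma.getD (inv.getD q 0) 0 = q) ∧
  (∀ p, p < arr.length → a.getD p 0 = arr.getD (sigma.getD p 0) 0)

lemma pvInvB_init (arr : List Int) :
    pvInvB arr arr (List.range arr.length) (List.range arr.length) := by
  refine ⟨rfl, by simp, by simp, ?_, ?_, ?_⟩
  · intro p hp
    rw [pvRange_getD _ _ hp]
    exact ⟨hp, pvRange_getD _ _ hp⟩
  · intro q hq
    rw [pvRange_getD _ _ hq]
    exact ⟨hq, pvRange_getD _ _ hq⟩
  · intro p hp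
    rw [pvRange_getD _ _ hp]

lemma pvEq_map_range (a : List Int) (n : Nat) (f : Nat → Int)
    (hlen : a.length = n) (hp : ∀ p, p < n → a.getD p 0 = f p) :
    a = (List.range n).map f := by
  apply List.ext_getElem
  · simp [hlen]
  · intro p h1 h2
    have := hp p (by omega)
    simp only [List.getD, List.getElem?_eq_getElem h1, Option.getD_some] at this
    simpa using this

-- main simulation lemma
lemma pvLoops_eq : ∀ (cnt : Nat) (arr a : List Int) (sigma inv : List Nat) (i : Nat),
    i + cnt ≤ arr.length → pvInvB arr a sigma inv →
    pvAloop cnt a i =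
      (List.range arr.length).map (fun p =>
        arr.getD ((((List.range' i cnt).foldl (pvBstep arr (pvBocc arr)) (sigma, inv)).1).getD p 0) 0) := by
  intro cnt
  induction cnt with
  | zero =>
      intro arr a sigma inv i _ hInv
      obtain ⟨hal, _, _, _, _, hval⟩ := hInv
      simpa [pvAloop] using pvEq_map_range a arr.length _ hal hval
  | succ cnt ih =>
      intro arr a sigma inv i hlen hInv
      obtain ⟨hal, hsl, hil, hfw, hbw, hval⟩ := hInv
      have hi : i < a.length := by omega
      have hin : i < arr.length := by omega
      have hcur : a.getD i 0 = arr.getD (sigma.getD i 0) 0 := hval i hin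
      rw [List.range'_succ, List.foldl_cons]
      show pvAloop (cnt + 1) a i = _
      rw [pvAloop]
      simp only [hi, if_true]
      by_cases hskip : a.getD i 0 = (i : Int)
      · rw [if_pos hskip]
        have hB : pvBstep arr (pvBocc arr) (sigma, inv) i = (sigma, inv) := by
          simp only [pvBstep]
          rw [if_pos (hcur ▸ hskip)]
        rw [hB]
        exact ih arr a sigma inv (i + 1) (by omega) ⟨hal, hsl, hil, hfw, hbw, hval⟩
      · rw [if_neg hskip, pvAinner_eq_find]
        have hcond : ¬ arr.getD (sigma.getD i 0) 0 = (i : Int) := hcur ▸ hskip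
        cases hps : (pvBocc arr).getD (i : Int) [] with
        | nil =>
            -- value i does not occur in arr, hence not in a either
            have hnone : pvFindFrom a i 0 = none := by
              cases hf : pvFindFrom a i 0 with
              | none => rfl
              | some k =>
                  obtain ⟨_, hk, hkv, _⟩ := pvFindFrom_some a i 0 k hf
                  have hk' : k < arr.length := by omega
                  have : sigma.getD k 0 ∈ (pvBocc arr).getD (i : Int) [] := by
                    rw [pvBocc_getD]
                    refine List.mem_filter.mpr ⟨List.mem_range.mpr (hfw k hk').1, ?_⟩
                    simp only [decide_eq_true_eq]
                    rw [← hval k hk']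
                    exact hkv
                  rw [hps] at this
                  simp at this
            rw [hnone]
            have hB : pvBstep arr (pvBocc arr) (sigma, inv) i = (sigma, inv) := by
              simp only [pvBstep]
              rw [if_neg hcond, hps, if_pos rfl]
            rw [hB]
            exact ih arr a sigma inv (i + 1) (by omega) ⟨hal, hsl, hil, hfw, hbw, hval⟩
        | cons p0 pt =>
            -- the candidate positions {inv[q] | q ∈ ps} are exactly the current positions of i
            have hmem : ∀ x, x ∈ (p0 :: pt).map (fun q => inv.getD q 0)
                ↔ (x < arr.length ∧ a.getD x 0 = (i : Int)) := by
              intro x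
              constructor
              · intro hx
                obtain ⟨q, hq, rfl⟩ := List.mem_map.mp hx
                rw [← hps, pvBocc_getD] at hq
                obtain ⟨hqr, hqv⟩ := List.mem_filter.mp hq
                have hqn : q < arr.length := List.mem_range.mp hqr
                obtain ⟨hiq, hsq⟩ := hbw q hqn
                refine ⟨hiq, ?_⟩
                rw [hval _ hiq, hsq]
                simpa using hqv
              · rintro ⟨hx, hxa⟩
                have hsx : sigma.getD x 0 ∈ (p0 :: pt) := by
                  rw [← hps, pvBocc_getD]
                  refine List.mem_filter.mpr ⟨List.mem_range.mpr (hfw x hx).1, ?_⟩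
                  simp only [decide_eq_true_eq]
                  rw [← hval x hx]
                  exact hxa
                refine List.mem_map.mpr ⟨sigma.getD x 0, hsx, ?_⟩
                exact (hfw x hx).2
            -- A finds some position k0 (a copy of i exists)
            obtain ⟨k0, hf⟩ : ∃ k0, pvFindFrom a i 0 = some k0 := by
              cases hf : pvFindFrom a i 0 with
              | some k0 => exact ⟨k0, rfl⟩
              | none =>
                  have hp0 : inv.getD p0 0 ∈ (p0 :: pt).map (fun q => inv.getD q 0) := by
                    exact List.mem_map.mpr ⟨p0, by simp, rfl⟩
                  rw [hmem] at hp0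
                  exact absurd hp0.2 (pvFindFrom_none a i 0 hf _ (Nat.zero_le _) (by omega))
            obtain ⟨_, hk0n, hk0v, hmin⟩ := pvFindFrom_some a i 0 k0 hf
            have hk0n' : k0 < arr.length := by omega
            -- and B's min over the candidates is exactly k0
            have hminB : PySem.List.min? ((p0 :: pt).map (fun q => inv.getD q 0)) (fun x => x)
                = some k0 := by
              obtain ⟨m, hm⟩ : ∃ m, PySem.List.min? ((p0 :: pt).map (fun q => inv.getD q 0)) (fun x => x) = some m := by
                cases hmm : PySem.List.min? ((p0 :: pt).map (fun q => inv.getD q 0)) (fun x => x) with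
                | none =>
                    have := (PySem.List.min?_eq_none_iff _ _).mp hmm
                    simp at this
                | some m => exact ⟨m, rfl⟩
              have hmmem := PySem.List.min?_mem hm
              rw [hmem] at hmmem
              have hk0mem : k0 ∈ (p0 :: pt).map (fun q => inv.getD q 0) := by
                rw [hmem]; exact ⟨hk0n', hk0v⟩
              have h1 : k0 ≤ m := by
                by_contra h
                exact hmin m (Nat.zero_le _) (by omega) hmmem.2
              have h2 : m ≤ k0 := PySem.List.min?_isMin hm _ hk0mem
              rw [hm, Nat.le_antisymm h2 h1]
            have hik0 : i ≠ k0 := fun h => hskip (h ▸ hk0v)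
            set si := sigma.getD i 0 with hsi
            set sj := sigma.getD k0 0 with hsj
            have hsin : si < arr.length := (hfw i hin).1
            have hsjn : sj < arr.length := (hfw k0 hk0n').1
            have hsisj : si ≠ sj := by
              intro h
              have h1 := (hfw i hin).2
              have h2 := (hfw k0 hk0n').2
              rw [← hsi] at h1; rw [← hsj, ← h] at h2
              exact hik0 (h1 ▸ h2 ▸ rfl)
            have hB : pvBstep arr (pvBocc arr) (sigma, inv) i
                = ((sigma.set i sj).set k0 si, (inv.set si k0).set sj i) := by
              simp only [pvBstep]
              rw [if_neg hcond, hps, if_neg (by simp : ¬((p0 :: pt : List Nat) = [])), hminB]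
            rw [hB, hf]
            -- re-establish the invariant for the swapped state
            set a' := (a.set k0 (a.getD i 0)).set i (a.getD k0 0) with ha'
            set sigma' := (sigma.set i sj).set k0 si with hsigma'
            set inv' := (inv.set si k0).set sj i with hinv'
            have hsg : ∀ p, p < arr.length → sigma'.getD p 0 =
                if p = i then sj else if p = k0 then si else sigma.getD p 0 := by
              intro p hp
              rw [hsigma', pvGetD_set, pvGetD_set]
              simp only [List.length_set]
              split_ifs <;> first | rfl | omega
            have hig : ∀ q, q < arr.length → inv'.getD q 0 =
                if q = sj then i else if q = si then k0 else inv.getD q 0 := by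
              intro q hq
              rw [hinv', pvGetD_set, pvGetD_set]
              simp only [List.length_set]
              split_ifs <;> first | rfl | omega
            have hag : ∀ p, p < arr.length → a'.getD p 0 =
                if p = i then a.getD k0 0 else if p = k0 then a.getD i 0 else a.getD p 0 := by
              intro p hp
              rw [ha', pvGetD_set, pvGetD_set]
              simp only [List.length_set]
              split_ifs <;> first | rfl | omega
            have hInv' : pvInvB arr a' sigma' inv' := by
              refine ⟨by simp [ha', hal], by simp [hsigma', hsl], by simp [hinv', hil], ?_, ?_, ?_⟩
              · intro p hp
                rw [hsg p hp]
                by_cases h1 : p = i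
                · subst h1
                  rw [if_pos rfl, hig sj hsjn, if_pos rfl]
                  exact ⟨hsjn, rfl⟩
                · rw [if_neg h1]
                  by_cases h2 : p = k0
                  · subst h2
                    rw [if_pos rfl, hig si hsin, if_neg hsisj, if_pos rfl]
                    exact ⟨hsin, rfl⟩
                  · rw [if_neg h2]
                    obtain ⟨hlt, heq⟩ := hfw p hp
                    rw [hig _ hlt]
                    have hne1 : sigma.getD p 0 ≠ sj := by
                      intro h
                      have hc := (hfw k0 hk0n').2
                      rw [← hsj, ← h, heq] at hc
                      omega
                    have hne2 : sigma.getD p 0 ≠ si := by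
                      intro h
                      have hc := (hfw i hin).2
                      rw [← hsi, ← h, heq] at hc
                      omega
                    rw [if_neg hne1, if_neg hne2]
                    exact ⟨hlt, heq⟩
              · intro q hq
                rw [hig q hq]
                by_cases h1 : q = sj
                · subst h1
                  rw [if_pos rfl, hsg i hin, if_pos rfl]
                  exact ⟨hin, rfl⟩
                · rw [if_neg h1]
                  by_cases h2 : q = si
                  · subst h2
                    rw [if_pos rfl, hsg k0 hk0n', if_neg (Ne.symm hik0), if_pos rfl]
                    exact ⟨hk0n', rfl⟩
                  · rw [if_neg h2]
                    obtain ⟨hlt, heq⟩ := hbw q hq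
                    rw [hsg _ hlt]
                    have hne1 : inv.getD q 0 ≠ i := by
                      intro h
                      rw [h] at heq
                      have hc := hsi.trans heq
                      omega
                    have hne2 : inv.getD q 0 ≠ k0 := by
                      intro h
                      rw [h] at heq
                      have hc := hsj.trans heq
                      omega
                    rw [if_neg hne1, if_neg hne2]
                    exact ⟨hlt, heq⟩
              · intro p hp
                rw [hag p hp, hsg p hp]
                by_cases h1 : p = i
                · subst h1
                  rw [if_pos rfl, if_pos rfl, hval k0 hk0n', ← hsj]
                · rw [if_neg h1, if_neg h1]
                  by_cases h2 : p = k0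
                  · subst h2
                    rw [if_pos rfl, if_pos rfl, hval i hin, ← hsi]
                  · rw [if_neg h2, if_neg h2]
                    exact hval p hp
            exact ih arr a' sigma' inv' (i + 1) (by omega) hInv'

-- ===== VERDICT (by name: the statement is the Claim_ definition above) =====
theorem reorganize_the_array_spec : Claim_equal_reorganize_the_array := by
  intro arr _
  unfold Spec_reorganize_the_array reorganize_the_array reorganize_the_array_alt
  have h := pvLoops_eq arr.length arr arr (List.range arr.length) (List.range arr.length) 0
    (by omega) (pvInvB_init arr)
  rw [← List.range_eq_range'] at h
  exact h
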